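-- pv_equiv track=rewrite | github.com/zhangyialn/graduation-project | backend/controllers/applicationController.py | _build_address_text
-- ===== SOURCE A (Python) =====
-- def _build_address_text(address=None):
--     payload = address or {}
--     province = payload.get('state') or payload.get('province') or ''
--     city = payload.get('city') or payload.get('town') or payload.get('county') or payload.get('state_district') or ''
--     district = payload.get('city_district') or payload.get('suburb') or payload.get('borough') or payload.get('quarter') or ''
--     road = payload.get('road') or payload.get('pedestrian') or payload.get('residential') or payload.get('neighbourhood') or ''
--     number = payload.get('house_number') or ''
--     return ''.join([part for part in [province, city, district, road, number] if part])
-- ===== SOURCE B (Python) =====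
-- _GROUPS = {
--     'state': (0, 0), 'province': (0, 1),
--     'city': (1, 0), 'town': (1, 1), 'county': (1, 2), 'state_district': (1, 3),
--     'city_district': (2, 0), 'suburb': (2, 1), 'borough': (2, 2), 'quarter': (2, 3),
--     'road': (3, 0), 'pedestrian': (3, 1), 'residential': (3, 2), 'neighbourhood': (3, 3),
--     'house_number': (4, 0),
-- }
--
--
-- def _build_address_text(address=None):
--     best = [None] * 5
--     for key, value in (address or {}).items():
--         slot = _GROUPS.get(key)
--         if slot is None or not value:
--             continue
--         group, rank = slot
--         if best[group] is None or rank < best[group][0]: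
--             best[group] = (rank, value)
--     return ''.join(entry[1] for entry in best if entry is not None)
-- ===== Notes on version B (the rewrite author's own statement) =====
-- stated objective: alternative
-- what changed: Replaces A's five flat or-chains of repeated dict lookups (15 .get calls) by a single pass over the dict items with a key->(group,rank) priority table, keeping per group the truthy value of smallest rank.
import Mathlib
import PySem

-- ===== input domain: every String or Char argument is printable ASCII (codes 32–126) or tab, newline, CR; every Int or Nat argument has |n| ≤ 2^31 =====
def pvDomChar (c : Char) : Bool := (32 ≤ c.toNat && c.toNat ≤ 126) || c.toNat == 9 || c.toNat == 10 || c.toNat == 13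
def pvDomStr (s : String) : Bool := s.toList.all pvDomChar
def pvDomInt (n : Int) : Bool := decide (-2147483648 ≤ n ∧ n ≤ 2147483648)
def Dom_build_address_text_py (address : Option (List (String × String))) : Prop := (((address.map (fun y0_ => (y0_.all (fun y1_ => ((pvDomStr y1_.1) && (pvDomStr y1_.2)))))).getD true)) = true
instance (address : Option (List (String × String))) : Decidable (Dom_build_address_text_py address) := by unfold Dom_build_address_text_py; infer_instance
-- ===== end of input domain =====

-- B replaces A's five flat `or`-chains of dict lookups by a single pass over the dict's
-- items with a key→(group, rank) priority table (objective: alternative decomposition).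

-- ===== PORT A =====
-- payload.get(k) on the dict (first match in the association list)
def pvGet (payload : List (String × String)) (k : String) : Option String :=
  PySem.Dict.get? (PySem.Dict.mk payload) k

-- Python `x or y` for x an Optional[str] ('' and None are falsy)
def pvOr (a : Option String) (b : String) : String :=
  match a with
  | some v => if v = "" then b else v
  | none => b

def build_address_text_py (address : Option (List (String × String))) : String :=
  let payload := address.getD []   -- `address or {}`
  let province := pvOr (pvGet payload "state") (pvOr (pvGet payload "province") "")
  let city := pvOr (pvGet payload "city") (pvOr (pvGet payload "town")
      (pvOr (pvGet payload "county") (pvOr (pvGet payload "state_district") "")))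
  let district := pvOr (pvGet payload "city_district") (pvOr (pvGet payload "suburb")
      (pvOr (pvGet payload "borough") (pvOr (pvGet payload "quarter") "")))
  let road := pvOr (pvGet payload "road") (pvOr (pvGet payload "pedestrian")
      (pvOr (pvGet payload "residential") (pvOr (pvGet payload "neighbourhood") "")))
  let number := pvOr (pvGet payload "house_number") ""
  PySem.Str.join "" (List.filter (fun p => p != "") [province, city, district, road, number])

-- ===== PORT B =====
-- the _GROUPS table of Source B
def pvGroups : PySem.Dict String (Nat × Nat) :=
  PySem.Dict.mk
    [("state", (0, 0)), ("province", (0, 1)),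
     ("city", (1, 0)), ("town", (1, 1)), ("county", (1, 2)), ("state_district", (1, 3)),
     ("city_district", (2, 0)), ("suburb", (2, 1)), ("borough", (2, 2)), ("quarter", (2, 3)),
     ("road", (3, 0)), ("pedestrian", (3, 1)), ("residential", (3, 2)), ("neighbourhood", (3, 3)),
     ("house_number", (4, 0))]

-- one iteration of Source B's loop body
def pvStep (best : List (Option (Nat × String))) (kv : String × String) : List (Option (Nat × String)) :=
  match PySem.Dict.get? pvGroups kv.1 with
  | none => best
  | some (g, r) =>
      if kv.2 = "" then best
      else
        match best.getD g none with
        | none => best.set g (some (r, kv.2))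
        | some (r0, _) => if r < r0 then best.set g (some (r, kv.2)) else best

def build_address_text_py_alt (address : Option (List (String × String))) : String :=
  let best := (address.getD []).foldl pvStep [none, none, none, none, none]
  PySem.Str.join "" ((best.filterMap id).map (·.2))

-- ===== PRECONDITION & SPEC =====
-- Pre_ excludes association lists with duplicate keys: they represent no Python dict
-- (a Python dict has unique keys), so A's first-match value there is accidental.
def Pre_build_address_text_py (address : Option (List (String × String))) : Prop :=
  ((address.getD []).map Prod.fst).Nodup
instance (address : Option (List (String × String))) : Decidable (Pre_build_address_text_py address) := by unfold Pre_build_address_text_py; infer_instance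

def pvWitness_build_address_text_py : (Option (List (String × String))) :=
  some [("state", "Zhejiang"), ("city", "Hangzhou"), ("road", "Main St")]

def Spec_build_address_text_py (address : Option (List (String × String))) (out : String) : Prop := out = build_address_text_py_alt address
instance (address : Option (List (String × String))) (out : String) : Decidable (Spec_build_address_text_py address out) := by unfold Spec_build_address_text_py; infer_instance

-- ===== CLAIM (what is proved, stated in full; the proofs are below) =====
def Claim_equal_build_address_text_py : Prop := ∀ (address : Option (List (String × String))), Dom_build_address_text_py address → Pre_build_address_text_py address → Spec_build_address_text_py address (build_address_text_py address)

-- ===== LEMMAS AND PROOFS =====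

-- merging two candidates: keep the smaller rank, ties to the left (earlier) one
def pvMerge (s t : Option (Nat × String)) : Option (Nat × String) :=
  match s, t with
  | none, t => t
  | some a, none => some a
  | some a, some b => if b.1 < a.1 then some b else some a

-- the (rank, key) list of one group, in A's chain order
def pvKs : Nat → List (Nat × String)
  | 0 => [(0, "state"), (1, "province")]
  | 1 => [(0, "city"), (1, "town"), (2, "county"), (3, "state_district")]
  | 2 => [(0, "city_district"), (1, "suburb"), (2, "borough"), (3, "quarter")]
  | 3 => [(0, "road"), (1, "pedestrian"), (2, "residential"), (3, "neighbourhood")]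
  | 4 => [(0, "house_number")]
  | _ => []

-- candidate contributed by one item (k, v) at one scanned key rk
def pvSingleCand (k v : String) (rk : Nat × String) : Option (Nat × String) :=
  if rk.2 = k ∧ ¬ v = "" then some (rk.1, v) else none

-- candidate of one scanned key rk over the whole list l
def pvCand (l : List (String × String)) (rk : Nat × String) : Option (Nat × String) :=
  (pvGet l rk.2).bind (fun v => if v = "" then none else some (rk.1, v))

-- candidate contributed by a single item (k, v), relative to a group's key list
def pvSingle (ks : List (Nat × String)) (k v : String) : Option (Nat × String) :=
  ks.findSome? (pvSingleCand k v)

-- candidate contributed by a single item via the _GROUPS table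
def pvSingleG (g : Nat) (k v : String) : Option (Nat × String) :=
  match PySem.Dict.get? pvGroups k with
  | none => none
  | some (g', r) => if g' = g ∧ ¬ v = "" then some (r, v) else none

-- the winner of a group over the whole list: first key of ks whose lookup is truthy
def pvChain (ks : List (Nat × String)) (l : List (String × String)) : Option (Nat × String) :=
  ks.findSome? (pvCand l)

def pvVal : Option (Nat × String) → String
  | some p => p.2
  | none => ""

theorem pvMerge_none_left (t : Option (Nat × String)) : pvMerge none t = t := rfl

theorem pvMerge_none_right (s : Option (Nat × String)) : pvMerge s none = s := by
  cases s <;> rfl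

theorem pvMerge_some (a b : Nat × String) :
    pvMerge (some a) (some b) = if b.1 < a.1 then some b else some a := rfl

theorem pvMerge_assoc (a b c : Option (Nat × String)) :
    pvMerge (pvMerge a b) c = pvMerge a (pvMerge b c) := by
  rcases a with _ | a
  · rw [pvMerge_none_left, pvMerge_none_left]
  rcases b with _ | b
  · rw [pvMerge_none_right, pvMerge_none_left]
  rcases c with _ | c
  · rw [pvMerge_none_right, pvMerge_none_right]
  simp only [pvMerge_some]
  split_ifs <;> simp only [pvMerge_some] <;> split_ifs <;> first | rfl | omega

theorem pvChain_cons_none {l : List (String × String)} {x : Nat × String}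
    (t : List (Nat × String)) (h : pvCand l x = none) : pvChain (x :: t) l = pvChain t l := by
  simp [pvChain, h]

theorem pvChain_cons_some {l : List (String × String)} {x q : Nat × String}
    (t : List (Nat × String)) (h : pvCand l x = some q) : pvChain (x :: t) l = some q := by
  simp [pvChain, h]

theorem pvSingle_cons_none {k v : String} {x : Nat × String}
    (t : List (Nat × String)) (h : pvSingleCand k v x = none) :
    pvSingle (x :: t) k v = pvSingle t k v := by
  simp [pvSingle, h]

theorem pvSingle_cons_some {k v : String} {x q : Nat × String}
    (t : List (Nat × String)) (h : pvSingleCand k v x = some q) :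
    pvSingle (x :: t) k v = some q := by
  simp [pvSingle, h]

theorem pvGet_cons (k v k' : String) (l : List (String × String)) :
    pvGet ((k, v) :: l) k' = if k == k' then some v else pvGet l k' := by
  simp [pvGet, PySem.Dict.get?_mk_cons]

theorem pvGet_eq_none (k : String) (l : List (String × String)) (h : k ∉ l.map Prod.fst) :
    pvGet l k = none := by
  induction l with
  | nil => rfl
  | cons x t ih =>
      simp only [List.map_cons, List.mem_cons, not_or] at h
      rw [pvGet_cons, if_neg, ih h.2]
      simp only [beq_iff_eq]
      exact fun e => h.1 e.symm

theorem pvCand_eq_some (l : List (String × String)) (x q : Nat × String)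
    (h : pvCand l x = some q) : q.1 = x.1 ∧ q.2 ≠ "" := by
  rw [pvCand] at h
  rcases hg : pvGet l x.2 with _ | w <;> rw [hg] at h
  · cases h
  · rw [Option.bind_some] at h
    by_cases hw : w = ""
    · rw [if_pos hw] at h; cases h
    · rw [if_neg hw] at h
      cases h
      exact ⟨rfl, hw⟩

theorem pvChain_nil (ks : List (Nat × String)) : pvChain ks [] = none := by
  induction ks with
  | nil => rfl
  | cons x t ih =>
      rw [pvChain_cons_none t (by rw [pvCand, show pvGet [] x.2 = none from rfl]; rfl)]
      exact ih

theorem pvChain_rank_mem (ks : List (Nat × String)) (l : List (String × String)) (p : Nat × String)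
    (h : pvChain ks l = some p) : ∃ k, (p.1, k) ∈ ks := by
  induction ks with
  | nil => simp [pvChain] at h
  | cons x t ih =>
      rcases hx : pvCand l x with _ | q
      · rw [pvChain_cons_none t hx] at h
        rcases ih h with ⟨k, hk⟩
        exact ⟨k, List.mem_cons_of_mem _ hk⟩
      · rw [pvChain_cons_some t hx] at h
        cases h
        refine ⟨x.2, ?_⟩
        rw [(pvCand_eq_some l x p hx).1]
        show (x.1, x.2) ∈ x :: t
        rw [Prod.mk.eta]
        exact List.mem_cons_self ..

theorem pvSingle_rank_mem (ks : List (Nat × String)) (k v : String) (p : Nat × String)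
    (h : pvSingle ks k v = some p) : ∃ k', (p.1, k') ∈ ks := by
  induction ks with
  | nil => simp [pvSingle] at h
  | cons x t ih =>
      by_cases hc : x.2 = k ∧ ¬ v = ""
      · rw [pvSingle_cons_some t (by rw [pvSingleCand, if_pos hc])] at h
        cases h
        exact ⟨x.2, by show (x.1, x.2) ∈ x :: t; rw [Prod.mk.eta]; exact List.mem_cons_self ..⟩
      · rw [pvSingle_cons_none t (by rw [pvSingleCand, if_neg hc])] at h
        rcases ih h with ⟨k', hk⟩
        exact ⟨k', List.mem_cons_of_mem _ hk⟩

theorem pvSingle_empty (ks : List (Nat × String)) (k : String) : pvSingle ks k "" = none := by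
  induction ks with
  | nil => rfl
  | cons x t ih =>
      rw [pvSingle_cons_none t (by simp [pvSingleCand])]
      exact ih

-- head-cons recurrence for pvChain, valid when k is not a key of l and ranks increase along ks
theorem pvChain_cons (ks : List (Nat × String)) (k v : String) (l : List (String × String))
    (hk : pvGet l k = none) (hp : ks.Pairwise (fun a b => a.1 < b.1)) :
    pvChain ks ((k, v) :: l) = pvMerge (pvSingle ks k v) (pvChain ks l) := by
  induction ks with
  | nil => rfl
  | cons x t ih =>
      rcases hp with _ | ⟨hlt, hp⟩
      have ih' := ih hp
      by_cases hxk : k = x.2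
      · -- the head key of the group is exactly the inserted key
        have hgl : pvGet l x.2 = none := hxk ▸ hk
        have hcl : pvCand l x = none := by rw [pvCand, hgl]; rfl
        have hx1lt : ∀ p, pvChain t l = some p → x.1 < p.1 := by
          intro p hc
          rcases pvChain_rank_mem t l p hc with ⟨k', hk'⟩
          exact hlt (p.1, k') hk' 
        by_cases hv : v = ""
        · -- empty value: every head candidate is dead
          subst hv
          have hcc : pvCand ((k, "") :: l) x = none := by
            rw [pvCand, pvGet_cons, if_pos (by simp [hxk])]
            simp
          simp only [pvChain_cons_none t hcc, pvChain_cons_none t hcl, ih',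
            pvSingle_empty, pvMerge_none_left]
        · -- truthy value: the left chain head fires, and wins the merge
          have hcc : pvCand ((k, v) :: l) x = some (x.1, v) := by
            rw [pvCand, pvGet_cons, if_pos (by simp [hxk])]
            simp [hv]
          have hsc : pvSingleCand k v x = some (x.1, v) := by
            rw [pvSingleCand, if_pos ⟨hxk.symm, hv⟩]
          rw [pvChain_cons_some t hcc, pvSingle_cons_some t hsc, pvChain_cons_none t hcl]
          rcases hc : pvChain t l with _ | p
          · rfl
          · have hrank : x.1 < p.1 := hx1lt p hc
            show some (x.1, v) = if p.1 < (x.1, v).1 then some p else some (x.1, v)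
            rw [if_neg (by simp; omega)]
      · -- head key differs from the inserted key
        have hcc : pvCand ((k, v) :: l) x = pvCand l x := by
          rw [pvCand, pvCand, pvGet_cons, if_neg (by simp; exact hxk)]
        have hsc : pvSingleCand k v x = none := by
          rw [pvSingleCand, if_neg (fun h => hxk h.1.symm)]
        rw [pvSingle_cons_none t hsc]
        rcases hg : pvCand l x with _ | q
        · rw [pvChain_cons_none t (hcc.trans hg), pvChain_cons_none t hg, ih']
        · rw [pvChain_cons_some t (hcc.trans hg), pvChain_cons_some t hg]
          have hq1 : q.1 = x.1 := (pvCand_eq_some l x q hg).1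
          rcases hs : pvSingle t k v with _ | p
          · rfl
          · rcases pvSingle_rank_mem t k v p hs with ⟨k', hk'⟩
            have hrank : x.1 < p.1 := hlt (p.1, k') hk'
            show some q = if q.1 < p.1 then some q else some p
            rw [if_pos (by omega)]

theorem pvStep_length (s : List (Option (Nat × String))) (kv : String × String) :
    (pvStep s kv).length = s.length := by
  unfold pvStep
  split
  · rfl
  · split
    · rfl
    · split
      · simp
      · split <;> simp

theorem pvGetD_set_self (s : List (Option (Nat × String))) (i : Nat) (h : i < s.length)
    (y : Option (Nat × String)) : (s.set i y).getD i none = y := by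
  simp [List.getD, List.getElem?_set_self h]

theorem pvGetD_set_ne (s : List (Option (Nat × String))) (i j : Nat) (h : i ≠ j)
    (y : Option (Nat × String)) : (s.set i y).getD j none = s.getD j none := by
  simp [List.getD, List.getElem?_set_ne h]

theorem pvStep_getD (s : List (Option (Nat × String))) (hs : s.length = 5) (k v : String)
    (g : Nat) (hg : g < 5) :
    (pvStep s (k, v)).getD g none = pvMerge (s.getD g none) (pvSingleG g k v) := by
  unfold pvStep pvSingleG
  dsimp only
  rcases hG : PySem.Dict.get? pvGroups k with _ | ⟨g', r⟩ <;> simp only [hG]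
  · rw [pvMerge_none_right]
  · by_cases hv : v = ""
    · rw [if_pos hv, if_neg (by simp [hv]), pvMerge_none_right]
    · rw [if_neg hv]
      by_cases hgg : g' = g
      · subst hgg
        rw [if_pos ⟨rfl, hv⟩]
        rcases hcur : s.getD g' none with _ | ⟨r0, w⟩
        · show (s.set g' (some (r, v))).getD g' none = pvMerge none (some (r, v))
          rw [pvGetD_set_self s g' (by omega), pvMerge_none_left]
        · show (if r < r0 then s.set g' (some (r, v)) else s).getD g' none
            = pvMerge (some (r0, w)) (some (r, v))
          rw [pvMerge_some]
          split_ifs with hr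
          · exact pvGetD_set_self s g' (by omega) _
          · exact hcur
      · rw [if_neg (fun h => hgg h.1), pvMerge_none_right]
        rcases hcur : s.getD g' none with _ | ⟨r0, w⟩
        · show (s.set g' (some (r, v))).getD g none = s.getD g none
          exact pvGetD_set_ne s g' g hgg _
        · show (if r < r0 then s.set g' (some (r, v)) else s).getD g none = s.getD g none
          split_ifs with hr
          · exact pvGetD_set_ne s g' g hgg _
          · rfl

set_option maxHeartbeats 2000000 in
theorem pvSingle_bridge (g : Nat) (hg : g < 5) (k v : String) :
    pvSingleG g k v = pvSingle (pvKs g) k v := by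
  by_cases hv : v = ""
  · subst hv
    rw [pvSingle_empty, pvSingleG]
    rcases PySem.Dict.get? pvGroups k with _ | p
    · rfl
    · simp
  · by_cases h0 : k = "state"
    · subst h0
      interval_cases g <;> simp [pvSingleG, pvSingle, pvSingleCand, pvKs, pvGroups, PySem.Dict.get?_mk_cons, hv]
    by_cases h1 : k = "province"
    · subst h1
      interval_cases g <;> simp [pvSingleG, pvSingle, pvSingleCand, pvKs, pvGroups, PySem.Dict.get?_mk_cons, hv]
    by_cases h2 : k = "city"
    · subst h2
      interval_cases g <;> simp [pvSingleG, pvSingle, pvSingleCand, pvKs, pvGroups, PySem.Dict.get?_mk_cons, hv]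
    by_cases h3 : k = "town"
    · subst h3
      interval_cases g <;> simp [pvSingleG, pvSingle, pvSingleCand, pvKs, pvGroups, PySem.Dict.get?_mk_cons, hv]
    by_cases h4 : k = "county"
    · subst h4
      interval_cases g <;> simp [pvSingleG, pvSingle, pvSingleCand, pvKs, pvGroups, PySem.Dict.get?_mk_cons, hv]
    by_cases h5 : k = "state_district"
    · subst h5
      interval_cases g <;> simp [pvSingleG, pvSingle, pvSingleCand, pvKs, pvGroups, PySem.Dict.get?_mk_cons, hv]
    by_cases h6 : k = "city_district"
    · subst h6
      interval_cases g <;> simp [pvSingleG, pvSingle, pvSingleCand, pvKs, pvGroups, PySem.Dict.get?_mk_cons, hv]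
    by_cases h7 : k = "suburb"
    · subst h7
      interval_cases g <;> simp [pvSingleG, pvSingle, pvSingleCand, pvKs, pvGroups, PySem.Dict.get?_mk_cons, hv]
    by_cases h8 : k = "borough"
    · subst h8
      interval_cases g <;> simp [pvSingleG, pvSingle, pvSingleCand, pvKs, pvGroups, PySem.Dict.get?_mk_cons, hv]
    by_cases h9 : k = "quarter"
    · subst h9
      interval_cases g <;> simp [pvSingleG, pvSingle, pvSingleCand, pvKs, pvGroups, PySem.Dict.get?_mk_cons, hv]
    by_cases h10 : k = "road"
    · subst h10
      interval_cases g <;> simp [pvSingleG, pvSingle, pvSingleCand, pvKs, pvGroups, PySem.Dict.get?_mk_cons, hv]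
    by_cases h11 : k = "pedestrian"
    · subst h11
      interval_cases g <;> simp [pvSingleG, pvSingle, pvSingleCand, pvKs, pvGroups, PySem.Dict.get?_mk_cons, hv]
    by_cases h12 : k = "residential"
    · subst h12
      interval_cases g <;> simp [pvSingleG, pvSingle, pvSingleCand, pvKs, pvGroups, PySem.Dict.get?_mk_cons, hv]
    by_cases h13 : k = "neighbourhood"
    · subst h13
      interval_cases g <;> simp [pvSingleG, pvSingle, pvSingleCand, pvKs, pvGroups, PySem.Dict.get?_mk_cons, hv]
    by_cases h14 : k = "house_number"
    · subst h14
      interval_cases g <;> simp [pvSingleG, pvSingle, pvSingleCand, pvKs, pvGroups, PySem.Dict.get?_mk_cons, hv]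
    have e0 : ("state" == k) = false := by rw [beq_eq_false_iff_ne]; exact fun e => h0 e.symm
    have f0 : ¬ "state" = k := fun e => h0 e.symm
    have e1 : ("province" == k) = false := by rw [beq_eq_false_iff_ne]; exact fun e => h1 e.symm
    have f1 : ¬ "province" = k := fun e => h1 e.symm
    have e2 : ("city" == k) = false := by rw [beq_eq_false_iff_ne]; exact fun e => h2 e.symm
    have f2 : ¬ "city" = k := fun e => h2 e.symm
    have e3 : ("town" == k) = false := by rw [beq_eq_false_iff_ne]; exact fun e => h3 e.symm
    have f3 : ¬ "town" = k := fun e => h3 e.symm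
    have e4 : ("county" == k) = false := by rw [beq_eq_false_iff_ne]; exact fun e => h4 e.symm
    have f4 : ¬ "county" = k := fun e => h4 e.symm
    have e5 : ("state_district" == k) = false := by rw [beq_eq_false_iff_ne]; exact fun e => h5 e.symm
    have f5 : ¬ "state_district" = k := fun e => h5 e.symm
    have e6 : ("city_district" == k) = false := by rw [beq_eq_false_iff_ne]; exact fun e => h6 e.symm
    have f6 : ¬ "city_district" = k := fun e => h6 e.symm
    have e7 : ("suburb" == k) = false := by rw [beq_eq_false_iff_ne]; exact fun e => h7 e.symm
    have f7 : ¬ "suburb" = k := fun e => h7 e.symm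
    have e8 : ("borough" == k) = false := by rw [beq_eq_false_iff_ne]; exact fun e => h8 e.symm
    have f8 : ¬ "borough" = k := fun e => h8 e.symm
    have e9 : ("quarter" == k) = false := by rw [beq_eq_false_iff_ne]; exact fun e => h9 e.symm
    have f9 : ¬ "quarter" = k := fun e => h9 e.symm
    have e10 : ("road" == k) = false := by rw [beq_eq_false_iff_ne]; exact fun e => h10 e.symm
    have f10 : ¬ "road" = k := fun e => h10 e.symm
    have e11 : ("pedestrian" == k) = false := by rw [beq_eq_false_iff_ne]; exact fun e => h11 e.symm
    have f11 : ¬ "pedestrian" = k := fun e => h11 e.symm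
    have e12 : ("residential" == k) = false := by rw [beq_eq_false_iff_ne]; exact fun e => h12 e.symm
    have f12 : ¬ "residential" = k := fun e => h12 e.symm
    have e13 : ("neighbourhood" == k) = false := by rw [beq_eq_false_iff_ne]; exact fun e => h13 e.symm
    have f13 : ¬ "neighbourhood" = k := fun e => h13 e.symm
    have e14 : ("house_number" == k) = false := by rw [beq_eq_false_iff_ne]; exact fun e => h14 e.symm
    have f14 : ¬ "house_number" = k := fun e => h14 e.symm
    interval_cases g <;> simp [pvSingleG, pvSingle, pvSingleCand, pvKs, pvGroups, PySem.Dict.get?, e0, e1, e2, e3, e4, e5, e6, e7, e8, e9, e10, e11, e12, e13, e14, f0, f1, f2, f3, f4, f5, f6, f7, f8, f9, f10, f11, f12, f13, f14]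

theorem pvKs_pairwise (g : Nat) : (pvKs g).Pairwise (fun a b => a.1 < b.1) := by
  rcases g with _ | _ | _ | _ | _ | n
  · decide
  · decide
  · decide
  · decide
  · decide
  · simp [pvKs]

-- main loop invariant: each slot of the fold is the merge of the start slot with the group winner
theorem pvFold_getD (g : Nat) (hg : g < 5) (l : List (String × String)) :
    ∀ (s : List (Option (Nat × String))), (l.map Prod.fst).Nodup → s.length = 5 →
    (l.foldl pvStep s).getD g none = pvMerge (s.getD g none) (pvChain (pvKs g) l) := by
  induction l with
  | nil =>
      intro s _ _
      simp [pvChain_nil, pvMerge_none_right]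
  | cons x t ih =>
      intro s hnd hs
      rcases x with ⟨k, v⟩
      rw [List.map_cons, List.nodup_cons] at hnd
      obtain ⟨hk, hnd⟩ := hnd
      have hget : pvGet t k = none := pvGet_eq_none k t hk
      rw [List.foldl_cons, ih (pvStep s (k, v)) hnd (by rw [pvStep_length, hs]),
        pvStep_getD s hs k v g hg, pvSingle_bridge g hg, pvMerge_assoc,
        ← pvChain_cons (pvKs g) k v t hget (pvKs_pairwise g)]

theorem pvFold_length (l : List (String × String)) (s : List (Option (Nat × String))) :
    (l.foldl pvStep s).length = s.length := by
  induction l generalizing s with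
  | nil => rfl
  | cons x t ih => rw [List.foldl_cons, ih, pvStep_length]

theorem pvChain_truthy (ks : List (Nat × String)) (l : List (String × String)) (p : Nat × String)
    (h : pvChain ks l = some p) : p.2 ≠ "" := by
  induction ks with
  | nil => simp [pvChain] at h
  | cons x t ih =>
      rcases hx : pvCand l x with _ | q
      · rw [pvChain_cons_none t hx] at h
        exact ih h
      · rw [pvChain_cons_some t hx] at h
        cases h
        exact (pvCand_eq_some l x p hx).2

-- A's or-chain for a group equals the value of the group winner
theorem pvChain_val (ks : List (Nat × String)) (l : List (String × String)) :
    ks.foldr (fun rk acc => pvOr (pvGet l rk.2) acc) "" = pvVal (pvChain ks l) := by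
  induction ks with
  | nil => rfl
  | cons x t ih =>
      rw [List.foldr_cons, ih]
      rcases hx : pvGet l x.2 with _ | w
      · have hc : pvCand l x = none := by rw [pvCand, hx]; rfl
        rw [pvChain_cons_none t hc]
        rfl
      · by_cases hw : w = ""
        · have hc : pvCand l x = none := by rw [pvCand, hx, Option.bind_some, if_pos hw]
          rw [pvChain_cons_none t hc]
          show (if w = "" then pvVal (pvChain t l) else w) = pvVal (pvChain t l)
          rw [if_pos hw]
        · have hc : pvCand l x = some (x.1, w) := by rw [pvCand, hx, Option.bind_some, if_neg hw]
          rw [pvChain_cons_some t hc]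
          show (if w = "" then pvVal (pvChain t l) else w) = pvVal (some (x.1, w))
          rw [if_neg hw]
          rfl

-- assembling the five slots: A's filtered join equals B's filterMap join
theorem pvAssemble (c0 c1 c2 c3 c4 : Option (Nat × String))
    (h0 : ∀ p, c0 = some p → p.2 ≠ "") (h1 : ∀ p, c1 = some p → p.2 ≠ "")
    (h2 : ∀ p, c2 = some p → p.2 ≠ "") (h3 : ∀ p, c3 = some p → p.2 ≠ "")
    (h4 : ∀ p, c4 = some p → p.2 ≠ "") :
    List.filter (fun p => p != "") [pvVal c0, pvVal c1, pvVal c2, pvVal c3, pvVal c4]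
      = (List.filterMap id [c0, c1, c2, c3, c4]).map (·.2) := by
  rcases c0 <;> rcases c1 <;> rcases c2 <;> rcases c3 <;> rcases c4 <;>
    simp_all [pvVal, bne_iff_ne]

-- ===== VERDICT (by name: the statement is the Claim_ definition above) =====
theorem build_address_text_py_spec : Claim_equal_build_address_text_py := by
  intro address _ hpre
  unfold Spec_build_address_text_py build_address_text_py build_address_text_py_alt
  dsimp only
  set l := address.getD [] with hl
  have hnd : (l.map Prod.fst).Nodup := hpre
  have hlen : (l.foldl pvStep [none, none, none, none, none]).length = 5 := by
    rw [pvFold_length]; rfl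
  have hcomp : ∀ g, g < 5 →
      (l.foldl pvStep [none, none, none, none, none]).getD g none = pvChain (pvKs g) l := by
    intro g hg
    rw [pvFold_getD g hg l _ hnd rfl]
    interval_cases g <;> exact pvMerge_none_left _
  have hbest : l.foldl pvStep [none, none, none, none, none]
      = [pvChain (pvKs 0) l, pvChain (pvKs 1) l, pvChain (pvKs 2) l,
         pvChain (pvKs 3) l, pvChain (pvKs 4) l] := by
    apply List.ext_getElem (by rw [hlen]; rfl)
    intro i hi1 hi2
    have hi5 : i < 5 := by omega
    have hc := hcomp i hi5
    rw [List.getD_eq_getElem?_getD, List.getElem?_eq_getElem hi1] at hc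
    simp only [Option.getD_some] at hc
    rw [hc]
    interval_cases i <;> rfl
  simp only [pvKs] at hbest
  rw [hbest]
  have e0 := pvChain_val (pvKs 0) l
  have e1 := pvChain_val (pvKs 1) l
  have e2 := pvChain_val (pvKs 2) l
  have e3 := pvChain_val (pvKs 3) l
  have e4 := pvChain_val (pvKs 4) l
  simp only [pvKs, List.foldr_cons, List.foldr_nil] at e0 e1 e2 e3 e4
  rw [e0, e1, e2, e3, e4]
  rw [pvAssemble _ _ _ _ _ (fun p => pvChain_truthy _ _ p) (fun p => pvChain_truthy _ _ p)
    (fun p => pvChain_truthy _ _ p) (fun p => pvChain_truthy _ _ p) (fun p => pvChain_truthy _ _ p)]
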